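-- pv_equiv track=rewrite | github.com/pypi-data/pypi-mirror-350 | packages/project2md/project2md-1.3.1-py3-none-any.whl/project2md/signature_processor.py | _process_markdown
-- ===== SOURCE A (Python) =====
-- def _process_markdown(content: str) -> str:
--     """Extract headers from markdown and count section lines."""
--     lines = content.split('\n')
--     result = []
--     current_header_level = 0
--     section_start = 0
--
--     for i, line in enumerate(lines):
--         if line.startswith('#'):
--             # If we have a previous section, add line count
--             if current_header_level > 0:
--                 section_lines = i - section_start
--                 if result and not result[-1].endswith(']'):
--                     result[-1] += f" [lines:{section_lines}]"
--
--             # Add the current header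
--             header_level = len(line) - len(line.lstrip('#'))
--             result.append(line)
--             current_header_level = header_level
--             section_start = i + 1
--
--     # Handle the last section
--     if current_header_level > 0 and result:
--         section_lines = len(lines) - section_start
--         if not result[-1].endswith(']'):
--             result[-1] += f" [lines:{section_lines}]"
--
--     return '\n'.join(result)
-- ===== SOURCE B (Python) =====
-- def _process_markdown(content: str) -> str:
--     """Extract headers from markdown and count section lines (two-pass)."""
--     lines = content.split('\n')
--     hdrs = [(i, line) for i, line in enumerate(lines) if line.startswith('#')]
--     nexts = [i for i, _ in hdrs][1:] + [len(lines)]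
--     parts = []
--     for (i, line), nxt in zip(hdrs, nexts):
--         if not line.endswith(']'):
--             line += f" [lines:{nxt - i - 1}]"
--         parts.append(line)
--     return '\n'.join(parts)
-- ===== Notes on version B (the rewrite author's own statement) =====
-- stated objective: alternative
-- what changed: Replaces A's single stateful scan (which mutates the previously appended result entry when the next header arrives, plus a trailing fix-up) with two passes: first collect all (index, header-line) pairs, then zip each with the next header index and emit its annotated entry directly.
import Mathlib
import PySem

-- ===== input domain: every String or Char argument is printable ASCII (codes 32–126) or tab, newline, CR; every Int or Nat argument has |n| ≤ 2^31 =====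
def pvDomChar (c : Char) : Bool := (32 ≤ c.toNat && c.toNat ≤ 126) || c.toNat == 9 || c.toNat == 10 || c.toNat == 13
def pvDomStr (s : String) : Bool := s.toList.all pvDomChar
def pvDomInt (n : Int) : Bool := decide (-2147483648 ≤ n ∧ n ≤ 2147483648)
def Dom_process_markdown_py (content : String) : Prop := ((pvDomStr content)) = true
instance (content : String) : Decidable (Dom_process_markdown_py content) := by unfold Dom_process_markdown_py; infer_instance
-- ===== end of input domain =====

-- B replaces A's single stateful scan (which patches the previously emitted entry when the
-- next header arrives, plus a trailing fix-up) with two passes: collect the (index, header)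
-- pairs, then zip each with the next header index and emit its entry directly (objective: alternative).

-- ===== PORT A =====
-- Python's `if result and not result[-1].endswith(']'): result[-1] += f" [lines:{n}]"`
def pvAnnotLastA (res : List (List Char)) (n : Int) : List (List Char) :=
  match res.getLast? with
  | none => res
  | some last =>
      if PySem.Chars.endswith last "]".toList then res
      else res.dropLast ++ [last ++ " [lines:".toList ++ PySem.Int.toChars n ++ "]".toList]

def pvStepA (st : List (List Char) × Int × Int) (p : Int × List Char) :
    List (List Char) × Int × Int :=
  match st, p with
  | (result, chl, ss), (i, line) =>
    if PySem.Chars.startswith line "#".toList then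
      let result := if 0 < chl then pvAnnotLastA result (i - ss) else result
      -- header_level = len(line) - len(line.lstrip('#')); lstrip('#') ported exactly as dropWhile (· == '#')
      let hl := PySem.Chars.len line - PySem.Chars.len (line.dropWhile (· == '#'))
      (result ++ [line], hl, i + 1)
    else (result, chl, ss)

def process_markdown_py (content : String) : String :=
  let lines := PySem.Chars.splitOn content.toList "\n".toList
  match (PySem.List.enumerate lines).foldl pvStepA ([], 0, 0) with
  | (result, chl, ss) =>
    let result :=
      if 0 < chl ∧ result ≠ [] then pvAnnotLastA result ((lines.length : Int) - ss) else result
    String.ofList (PySem.Chars.join "\n".toList result)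

-- ===== PORT B =====
def process_markdown_py_alt (content : String) : String :=
  let lines := PySem.Chars.splitOn content.toList "\n".toList
  let hdrs := (PySem.List.enumerate lines).filter (fun p => PySem.Chars.startswith p.2 "#".toList)
  let nexts := (hdrs.map (fun p => p.1)).drop 1 ++ [(lines.length : Int)]
  let parts := (hdrs.zip nexts).map (fun q =>
    if PySem.Chars.endswith q.1.2 "]".toList then q.1.2
    else q.1.2 ++ " [lines:".toList ++ PySem.Int.toChars (q.2 - q.1.1 - 1) ++ "]".toList)
  String.ofList (PySem.Chars.join "\n".toList parts)

-- ===== PRECONDITION & SPEC =====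
def Spec_process_markdown_py (content : String) (out : String) : Prop := out = process_markdown_py_alt content
instance (content : String) (out : String) : Decidable (Spec_process_markdown_py content out) := by unfold Spec_process_markdown_py; infer_instance

-- ===== CLAIM (what is proved, stated in full; the proofs are below) =====
def Claim_equal_process_markdown_py : Prop := ∀ (content : String), Dom_process_markdown_py content → Spec_process_markdown_py content (process_markdown_py content)

-- ===== LEMMAS AND PROOFS =====

-- common shape of one annotated entry
def pvAnnot (cur : List Char) (n : Int) : List Char :=
  if PySem.Chars.endswith cur "]".toList then cur
  else cur ++ " [lines:".toList ++ PySem.Int.toChars n ++ "]".toList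

-- reference recursion: entries produced with pending header `cur`, n lines of its section seen
def pvBspec : List (List Char) → List Char → Int → List (List Char)
  | [], cur, n => [pvAnnot cur n]
  | l :: rest, cur, n =>
      if PySem.Chars.startswith l "#".toList then pvAnnot cur n :: pvBspec rest l 0
      else pvBspec rest cur (n + 1)

def pvBtop : List (List Char) → List (List Char)
  | [] => []
  | l :: rest =>
      if PySem.Chars.startswith l "#".toList then pvBspec rest l 0 else pvBtop rest

def pvFinishA (total : Int) (st : List (List Char) × Int × Int) : List (List Char) :=
  match st with
  | (res, chl, ss) => if 0 < chl ∧ res ≠ [] then pvAnnotLastA res (total - ss) else res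

theorem pvAnnotLastA_concat (done : List (List Char)) (cur : List Char) (n : Int) :
    pvAnnotLastA (done ++ [cur]) n = done ++ [pvAnnot cur n] := by
  simp only [pvAnnotLastA, pvAnnot, List.getLast?_concat, List.dropLast_concat]
  split_ifs <;> simp

theorem pv_hl_pos (l : List Char) (h : PySem.Chars.startswith l "#".toList = true) :
    0 < PySem.Chars.len l - PySem.Chars.len (l.dropWhile (· == '#')) := by
  rw [PySem.Chars.startswith_iff] at h
  obtain ⟨t, ht⟩ := h
  subst ht
  have := List.length_dropWhile_le (fun c => c == '#') t
  simp [PySem.Chars.len]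
  omega

theorem pvA_pending (rest : List (List Char)) :
    ∀ (i ss total : Int) (done : List (List Char)) (cur : List Char) (chl : Int),
    0 < chl → total = i + rest.length →
    pvFinishA total ((PySem.List.enumerate rest i).foldl pvStepA (done ++ [cur], chl, ss))
      = done ++ pvBspec rest cur (i - ss) := by
  induction rest with
  | nil =>
      intro i ss total done cur chl hchl htot
      simp only [PySem.List.enumerate_nil, List.foldl_nil, pvFinishA, pvBspec]
      rw [if_pos ⟨hchl, by simp⟩]
      have : total - ss = i - ss := by simp at htot; omega
      rw [this, pvAnnotLastA_concat]
  | cons l rest ih =>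
      intro i ss total done cur chl hchl htot
      rw [PySem.List.enumerate_cons, List.foldl_cons]
      by_cases h : PySem.Chars.startswith l "#".toList = true
      · have hstep : pvStepA (done ++ [cur], chl, ss) (i, l)
            = ((done ++ [pvAnnot cur (i - ss)]) ++ [l],
               PySem.Chars.len l - PySem.Chars.len (l.dropWhile (· == '#')), i + 1) := by
          simp only [pvStepA, if_pos h, if_pos hchl, pvAnnotLastA_concat]
        rw [hstep, ih (i + 1) (i + 1) total _ l _ (pv_hl_pos l h)
              (by simp at htot ⊢; omega)]
        simp only [pvBspec, if_pos h, List.append_assoc, List.singleton_append]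
        have : i + 1 - (i + 1) = (0 : Int) := by omega
        rw [this]
      · have hstep : pvStepA (done ++ [cur], chl, ss) (i, l) = (done ++ [cur], chl, ss) := by
          simp only [pvStepA, if_neg h]
        rw [hstep, ih (i + 1) ss total done cur chl hchl (by simp at htot ⊢; omega)]
        simp only [pvBspec, if_neg h]
        have : i + 1 - ss = i - ss + 1 := by omega
        rw [this]

theorem pvA_top (rest : List (List Char)) :
    ∀ (i ss total : Int), total = i + rest.length →
    pvFinishA total ((PySem.List.enumerate rest i).foldl pvStepA ([], 0, ss)) = pvBtop rest := by
  induction rest with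
  | nil => intro i ss total _; simp [PySem.List.enumerate_nil, pvFinishA, pvBtop]
  | cons l rest ih =>
      intro i ss total htot
      rw [PySem.List.enumerate_cons, List.foldl_cons]
      by_cases h : PySem.Chars.startswith l "#".toList = true
      · have hstep : pvStepA ([], 0, ss) (i, l)
            = (([] : List (List Char)) ++ [l],
               PySem.Chars.len l - PySem.Chars.len (l.dropWhile (· == '#')), i + 1) := by
          simp only [pvStepA, if_pos h]
          norm_num
        rw [hstep, pvA_pending rest (i + 1) (i + 1) total [] l _ (pv_hl_pos l h)
              (by simp at htot ⊢; omega)]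
        simp only [pvBtop, if_pos h, List.nil_append]
        have : i + 1 - (i + 1) = (0 : Int) := by omega
        rw [this]
      · have hstep : pvStepA ([], 0, ss) (i, l) = ([], 0, ss) := by
          simp only [pvStepA, if_neg h]
        rw [hstep, ih (i + 1) ss total (by simp at htot ⊢; omega)]
        simp only [pvBtop, if_neg h]

theorem pvB_pending (rest : List (List Char)) :
    ∀ (i j total : Int) (cur : List Char), total = i + rest.length →
    (let hs := (j, cur) ::
        (PySem.List.enumerate rest i).filter (fun p => PySem.Chars.startswith p.2 "#".toList);
     (hs.zip ((hs.map (fun p => p.1)).drop 1 ++ [total])).map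
        (fun q => pvAnnot q.1.2 (q.2 - q.1.1 - 1)))
      = pvBspec rest cur (i - j - 1) := by
  induction rest with
  | nil =>
      intro i j total cur htot
      simp only [PySem.List.enumerate_nil, List.filter_nil, List.map_cons, List.map_nil,
        List.drop_succ_cons, List.drop_nil, List.nil_append, List.zip_cons_cons, List.zip_nil_right,
        pvBspec]
      simp at htot
      rw [htot]
  | cons l rest ih =>
      intro i j total cur htot
      rw [PySem.List.enumerate_cons]
      by_cases h : PySem.Chars.startswith l "#".toList = true
      · rw [List.filter_cons_of_pos (by simpa using h)]
        have ihh := ih (i + 1) i total l (by simp at htot ⊢; omega)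
        simp only at ihh
        simp only [List.map_cons, List.drop_succ_cons, List.drop_zero, List.cons_append,
          List.zip_cons_cons, List.map_cons]
        simp only [List.map_cons, List.drop_succ_cons, List.drop_zero] at ihh
        rw [ihh]
        simp only [pvBspec, if_pos h]
        norm_num
      · rw [List.filter_cons_of_neg (by simpa using h)]
        rw [ih (i + 1) j total cur (by simp at htot ⊢; omega)]
        simp only [pvBspec, if_neg h]
        have : i + 1 - j - 1 = i - j - 1 + 1 := by omega
        rw [this]

theorem pvB_top (rest : List (List Char)) :
    ∀ (i total : Int), total = i + rest.length →
    (let hs := (PySem.List.enumerate rest i).filter (fun p => PySem.Chars.startswith p.2 "#".toList);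
     (hs.zip ((hs.map (fun p => p.1)).drop 1 ++ [total])).map
        (fun q => pvAnnot q.1.2 (q.2 - q.1.1 - 1)))
      = pvBtop rest := by
  induction rest with
  | nil => intro i total _; simp [PySem.List.enumerate_nil, pvBtop]
  | cons l rest ih =>
      intro i total htot
      rw [PySem.List.enumerate_cons]
      by_cases h : PySem.Chars.startswith l "#".toList = true
      · rw [List.filter_cons_of_pos (by simpa using h)]
        have hp := pvB_pending rest (i + 1) i total l (by simp at htot ⊢; omega)
        simp only at hp
        rw [show i + 1 - i - 1 = (0 : Int) by omega] at hp
        rw [hp]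
        simp only [pvBtop, if_pos h]
      · rw [List.filter_cons_of_neg (by simpa using h)]
        rw [ih (i + 1) total (by simp at htot ⊢; omega)]
        simp only [pvBtop, if_neg h]

-- ===== VERDICT (by name: the statement is the Claim_ definition above) =====
theorem process_markdown_py_spec : Claim_equal_process_markdown_py := by
  intro content _
  unfold Spec_process_markdown_py process_markdown_py process_markdown_py_alt
  dsimp only
  generalize PySem.Chars.splitOn content.toList "\n".toList = lines
  have hA : ∀ (total : Int) (st : List (List Char) × Int × Int),
      (if 0 < st.2.1 ∧ st.1 ≠ [] then pvAnnotLastA st.1 (total - st.2.2) else st.1)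
        = pvFinishA total st := by
    intro total st; rcases st with ⟨res, chl, ss⟩; rfl
  rw [hA (lines.length : Int) ((PySem.List.enumerate lines).foldl pvStepA ([], 0, 0)),
      pvA_top lines 0 0 (lines.length : Int) (by simp)]
  have hB := pvB_top lines 0 (lines.length : Int) (by simp)
  simp only at hB
  have : ((fun q : (Int × List Char) × Int =>
      if PySem.Chars.endswith q.1.2 "]".toList then q.1.2
      else q.1.2 ++ " [lines:".toList ++ PySem.Int.toChars (q.2 - q.1.1 - 1) ++ "]".toList))
      = (fun q : (Int × List Char) × Int => pvAnnot q.1.2 (q.2 - q.1.1 - 1)) := by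
    funext q; simp [pvAnnot]
  rw [this, hB]
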